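-- pv_equiv track=rewrite | github.com/DELTA-TJ-submission/PASTA | pasta/utils.py | _calc_pyramid_levels
-- ===== SOURCE A (Python) =====
-- import math
--
-- def _calc_pyramid_levels(height: int, width: int, tile_size: int) -> int:
--     """Estimate how many pyramid levels are required when halving per level."""
--
--     levels = 0
--     h, w = height, width
--     while min(h, w) > tile_size and h > 1 and w > 1:
--         h = math.ceil(h / 2)
--         w = math.ceil(w / 2)
--         levels += 1
--
--     return max(levels, 0)
-- ===== SOURCE B (Python) =====
-- def _calc_pyramid_levels(height: int, width: int, tile_size: int) -> int:
--     """Closed form: k ceil-halvings of n give ceil(n/2^k), so the answer is the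
--     smallest k with ceil(min_dim / 2^k) <= max(tile_size, 1)."""
--     m = min(height, width)
--     t = max(tile_size, 1)
--     if m <= t:
--         return 0
--     return (-(-m // t) - 1).bit_length()
-- ===== Notes on version B (the rewrite author's own statement) =====
-- stated objective: simpler
-- what changed: Replaces the ceil-halving while-loop over both dimensions with a direct closed form on the single reduced dimension: levels = bit_length(ceil(min(h,w)/max(t,1)) - 1).
import Mathlib
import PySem

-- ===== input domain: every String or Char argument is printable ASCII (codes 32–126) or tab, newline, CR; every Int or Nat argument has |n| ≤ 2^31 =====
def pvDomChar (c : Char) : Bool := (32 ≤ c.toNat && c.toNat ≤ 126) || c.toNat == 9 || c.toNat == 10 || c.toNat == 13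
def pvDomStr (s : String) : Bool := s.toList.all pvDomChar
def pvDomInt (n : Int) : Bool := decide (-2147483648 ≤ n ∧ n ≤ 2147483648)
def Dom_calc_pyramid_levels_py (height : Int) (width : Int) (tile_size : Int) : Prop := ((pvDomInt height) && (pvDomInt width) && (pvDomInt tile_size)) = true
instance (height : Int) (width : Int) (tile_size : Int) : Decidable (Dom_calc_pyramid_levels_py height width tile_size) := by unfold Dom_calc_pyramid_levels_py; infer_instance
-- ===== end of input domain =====

-- B replaces A's ceil-halving loop with the closed form bit_length(ceil(min/max(t,1)) - 1): simpler, O(1).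


-- ===== PORT A =====
-- math.ceil(n / 2) = -((-n) // 2): exact on the domain |n| ≤ 2^31 (float division by 2 is exact there)
def pvCeilHalf (n : Int) : Int := -(PySem.Int.floordiv (-n) 2)

theorem pvCeilHalf_lt (n : Int) (h : 1 < n) : pvCeilHalf n < n := by
  unfold pvCeilHalf
  rw [PySem.Int.floordiv_eq_ediv_of_pos (by omega)]
  omega

-- the while loop of A: state (h, w, levels)
def calcLoopA (h : Int) (w : Int) (levels : Int) (tile : Int) : Int :=
  if min h w > tile ∧ h > 1 ∧ w > 1 then
    calcLoopA (pvCeilHalf h) (pvCeilHalf w) (levels + 1) tile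
  else max levels 0
termination_by h.toNat + w.toNat
decreasing_by
  have h1 := pvCeilHalf_lt h (by omega)
  have h2 := pvCeilHalf_lt w (by omega)
  omega

def calc_pyramid_levels_py (height : Int) (width : Int) (tile_size : Int) : Int :=
  calcLoopA height width 0 tile_size

-- ===== PORT B =====
def calc_pyramid_levels_py_alt (height : Int) (width : Int) (tile_size : Int) : Int :=
  let m := min height width
  let t := max tile_size 1
  if m ≤ t then 0
  else ((PySem.Int.bitLength (-(PySem.Int.floordiv (-m) t) - 1) : Nat) : Int)

-- ===== PRECONDITION & SPEC =====
def Spec_calc_pyramid_levels_py (height : Int) (width : Int) (tile_size : Int) (out : Int) : Prop := out = calc_pyramid_levels_py_alt height width tile_size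
instance (height : Int) (width : Int) (tile_size : Int) (out : Int) : Decidable (Spec_calc_pyramid_levels_py height width tile_size out) := by unfold Spec_calc_pyramid_levels_py; infer_instance

-- ===== CLAIM (what is proved, stated in full; the proofs are below) =====
def Claim_equal_calc_pyramid_levels_py : Prop := ∀ (height : Int) (width : Int) (tile_size : Int), Dom_calc_pyramid_levels_py height width tile_size → Spec_calc_pyramid_levels_py height width tile_size (calc_pyramid_levels_py height width tile_size)

-- ===== LEMMAS AND PROOFS =====

-- ceiling division in terms of floor division of the predecessor (0 < t, 0 < a)
theorem ceil_eq_pred_floordiv_add_one (a t : Int) (ht : 0 < t) :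
    -(PySem.Int.floordiv (-a) t) = PySem.Int.floordiv (a - 1) t + 1 := by
  have hq := (PySem.Int.floordiv_eq_iff_of_pos (a := a - 1) (b := t)
      (q := PySem.Int.floordiv (a - 1) t) ht).mp rfl
  rw [PySem.Int.neg_floordiv_neg_eq_iff_of_pos ht]
  constructor <;> nlinarith [hq.1, hq.2]

-- floordiv of nonnegatives computes in Nat
theorem floordiv_toNat (a t : Int) (ha : 0 ≤ a) (ht : 0 ≤ t) :
    PySem.Int.floordiv a t = ((a.toNat / t.toNat : Nat) : Int) := by
  have h1 : a = ((a.toNat : Nat) : Int) := by omega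
  have h2 : t = ((t.toNat : Nat) : Int) := by omega
  rw [h1, h2, PySem.Int.floordiv_natCast]
  simp

-- ceil-half commutes with min
theorem pvCeilHalf_min (h w : Int) : pvCeilHalf (min h w) = min (pvCeilHalf h) (pvCeilHalf w) := by
  unfold pvCeilHalf
  rw [PySem.Int.floordiv_eq_ediv_of_pos (by omega), PySem.Int.floordiv_eq_ediv_of_pos (by omega),
      PySem.Int.floordiv_eq_ediv_of_pos (by omega)]
  omega

-- one halving step of the bit-length recursion, on the reduced Nat x = (m-1)/t
theorem bitLength_step (x : Nat) (hx : 1 ≤ x) :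
    ((PySem.Int.bitLength (x : Int) : Nat) : Int)
      = 1 + (if x / 2 = 0 then 0 else ((PySem.Int.bitLength ((x / 2 : Nat) : Int) : Nat) : Int)) := by
  by_cases h : x / 2 = 0
  · have hx1 : x = 1 := by omega
    subst hx1
    simp [h]
    decide
  · rw [if_neg h, PySem.Int.bitLength_natCast (by omega : 0 < x)]
    push_cast
    ring

-- the value of B's port once min height width > max tile_size 1, as a Nat bit-length
theorem alt_val (height width tile_size : Int)
    (hgt : max tile_size 1 < min height width) :
    calc_pyramid_levels_py_alt height width tile_size
      = ((PySem.Int.bitLength (((min height width - 1).toNat / (max tile_size 1).toNat : Nat) : Int) : Nat) : Int) := by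
  unfold calc_pyramid_levels_py_alt
  rw [if_neg (by omega)]
  rw [ceil_eq_pred_floordiv_add_one _ _ (by omega),
      floordiv_toNat _ _ (by omega) (by omega)]
  norm_num

-- loop invariant: calcLoopA adds alt's value to the accumulator
theorem calcLoopA_eq (h w tile levels : Int) (hl : 0 ≤ levels) :
    calcLoopA h w levels tile = levels + calc_pyramid_levels_py_alt h w tile := by
  by_cases hc : min h w > tile ∧ h > 1 ∧ w > 1
  · rw [calcLoopA, if_pos hc]
    have hm : (1 : Int) < min h w := by omega
    have hmono := pvCeilHalf_lt (min h w) hm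
    have hmin := pvCeilHalf_min h w
    have hge : 1 ≤ pvCeilHalf (min h w) := by
      unfold pvCeilHalf
      rw [PySem.Int.floordiv_eq_ediv_of_pos (by omega)]
      omega
    have ih := calcLoopA_eq (pvCeilHalf h) (pvCeilHalf w) tile (levels + 1) (by omega)
    rw [ih]
    -- it remains: alt h w = 1 + alt h' w'
    have hT : (0 : Int) < max tile 1 := by omega
    set t := max tile 1 with ht
    have hgt : t < min h w := by omega
    -- m' - 1 = floordiv (m-1) 2
    have hm' : min (pvCeilHalf h) (pvCeilHalf w) - 1 = PySem.Int.floordiv (min h w - 1) 2 := by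
      rw [← hmin]
      unfold pvCeilHalf
      rw [ceil_eq_pred_floordiv_add_one _ _ (by omega)]
      ring
    set X : Nat := (min h w - 1).toNat / t.toNat with hX
    have hX1 : 1 ≤ X := by
      rw [hX]
      have : t.toNat ≤ (min h w - 1).toNat := by omega
      exact (Nat.one_le_div_iff (by omega)).mpr this
    -- (m'-1).toNat = (m-1).toNat / 2, hence X' = X / 2
    have hhalf : (min (pvCeilHalf h) (pvCeilHalf w) - 1).toNat = (min h w - 1).toNat / 2 := by
      rw [hm', floordiv_toNat _ _ (by omega) (by omega)]
      simp
      omega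
    have hX' : (min (pvCeilHalf h) (pvCeilHalf w) - 1).toNat / t.toNat = X / 2 := by
      rw [hhalf, hX, Nat.div_div_eq_div_mul, Nat.div_div_eq_div_mul, Nat.mul_comm]
    rw [alt_val h w tile (by omega)]
    by_cases hstop : min (pvCeilHalf h) (pvCeilHalf w) ≤ t
    · -- next level would already fit: alt of the halved dims is 0, and X/2 = 0
      have halt0 : calc_pyramid_levels_py_alt (pvCeilHalf h) (pvCeilHalf w) tile = 0 := by
        unfold calc_pyramid_levels_py_alt
        rw [if_pos (by omega)]
      have hx20 : X / 2 = 0 := by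
        rw [← hX', Nat.div_eq_zero_iff]
        right
        omega
      rw [halt0, bitLength_step X hX1, if_pos hx20]
      ring
    · have hgt' : t < min (pvCeilHalf h) (pvCeilHalf w) := by omega
      rw [alt_val (pvCeilHalf h) (pvCeilHalf w) tile (by omega), hX']
      have hx2 : X / 2 ≠ 0 := by
        rw [Ne, ← hX', Nat.div_eq_zero_iff]
        push Not
        omega
      rw [bitLength_step X hX1, if_neg hx2]
      ring
  · rw [calcLoopA, if_neg hc]
    have : calc_pyramid_levels_py_alt h w tile = 0 := by
      unfold calc_pyramid_levels_py_alt
      rw [if_pos (by omega)]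
    omega
termination_by h.toNat + w.toNat
decreasing_by
  have h1 := pvCeilHalf_lt h (by omega)
  have h2 := pvCeilHalf_lt w (by omega)
  omega

-- ===== VERDICT (by name: the statement is the Claim_ definition above) =====
theorem calc_pyramid_levels_py_spec : Claim_equal_calc_pyramid_levels_py := by
  intro height width tile_size _
  unfold Spec_calc_pyramid_levels_py calc_pyramid_levels_py
  rw [calcLoopA_eq _ _ _ 0 le_rfl]
  ring
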